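-- pv_equiv track=rewrite | github.com/Org-EthereaLogic/DocDevAI-v3.0.0 | devdocai/quality/utils.py | sanitize_regex
-- ===== SOURCE A (Python) =====
-- from typing import List, Dict, Any, Optional, Tuple
--
-- def sanitize_regex(pattern: str, max_complexity: int = 100) -> Optional[str]:
--     """
--     Sanitize regex pattern to prevent ReDoS attacks.
--
--     Args:
--         pattern: Regex pattern to sanitize
--         max_complexity: Maximum allowed complexity
--
--     Returns:
--         Sanitized pattern or None if too complex
--     """
--     # Check for dangerous patterns
--     dangerous = [
--         r'(\w+)*',  # Exponential backtracking
--         r'(\d+)+',  # Nested quantifiers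
--         r'(.*)*',   # Catastrophic backtracking
--         r'(.+)+',   # Nested quantifiers with greedy matching
--     ]
--
--     for danger in dangerous:
--         if danger in pattern:
--             return None
--
--     # Check complexity (simplified)
--     complexity = 0
--     complexity += pattern.count('*') * 10
--     complexity += pattern.count('+') * 10
--     complexity += pattern.count('{') * 15
--     complexity += pattern.count('|') * 5
--     complexity += pattern.count('(') * 5
--
--     if complexity > max_complexity:
--         return None
--
--     return pattern
-- ===== SOURCE B (Python) =====
-- def sanitize_regex(pattern: str, max_complexity: int = 100):
--     """Sanitize regex pattern to prevent ReDoS attacks.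
--
--     Single fused left-to-right scan: at each index we check whether a
--     dangerous construct begins there (prefix test on the suffix), and
--     simultaneously accumulate the weight of the current character; this
--     replaces A's staged passes (four substring searches, then five counts).
--     """
--     dangers = ('(\\w+)*', '(\\d+)+', '(.*)*', '(.+)+')
--     weights = {'*': 10, '+': 10, '{': 15, '|': 5, '(': 5}
--     complexity = 0
--     for i in range(len(pattern)):
--         if any(pattern.startswith(d, i) for d in dangers):
--             return None
--         complexity += weights.get(pattern[i], 0)
--     return pattern if complexity <= max_complexity else None
-- ===== Notes on version B (the rewrite author's own statement) =====
-- stated objective: alternative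
-- what changed: A makes staged passes (four full substring searches, then five str.count scans, then a threshold test); B is one fused left-to-right scan that at each index tests whether a dangerous construct starts there via startswith and accumulates the character's weight from a table, exiting early on danger.
import Mathlib
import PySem

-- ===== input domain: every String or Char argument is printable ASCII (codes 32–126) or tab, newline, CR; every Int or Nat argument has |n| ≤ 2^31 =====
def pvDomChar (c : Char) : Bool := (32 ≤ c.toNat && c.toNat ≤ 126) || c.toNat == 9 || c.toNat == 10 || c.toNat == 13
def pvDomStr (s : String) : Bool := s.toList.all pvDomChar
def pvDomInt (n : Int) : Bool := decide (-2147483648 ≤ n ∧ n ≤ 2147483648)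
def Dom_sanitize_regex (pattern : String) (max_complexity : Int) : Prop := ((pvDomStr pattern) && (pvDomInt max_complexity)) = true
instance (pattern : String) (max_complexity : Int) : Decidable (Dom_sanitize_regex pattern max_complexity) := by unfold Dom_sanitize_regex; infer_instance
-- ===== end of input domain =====

-- B replaces A's staged passes (four substring searches, then five counts) with one fused
-- left-to-right scan that tests danger-prefix at each index and accumulates weights (objective: alternative).

-- ===== PORT A =====
-- the dangerous-substring list of Source A
def pvDangerous : List String := ["(\\w+)*", "(\\d+)+", "(.*)*", "(.+)+"]

def sanitize_regex (pattern : String) (max_complexity : Int) : Option String :=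
  -- 'for danger in dangerous: if danger in pattern: return None'
  if pvDangerous.any (fun d => PySem.Str.isIn d pattern) then none
  else
    let complexity : Int :=
      ((0 : Int)
        + (PySem.Str.count pattern "*" : Int) * 10
        + (PySem.Str.count pattern "+" : Int) * 10
        + (PySem.Str.count pattern "{" : Int) * 15
        + (PySem.Str.count pattern "|" : Int) * 5
        + (PySem.Str.count pattern "(" : Int) * 5)
    if complexity > max_complexity then none
    else some pattern

-- ===== PORT B =====
-- dangers = ('(\w+)*', '(\d+)+', '(.*)*', '(.+)+') as char lists (B tests them with startswith at each index)
def pvDangersL : List (List Char) := pvDangerous.map String.toList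
-- weights = {'*': 10, '+': 10, '{': 15, '|': 5, '(': 5}
def pvWeights : PySem.Dict Char Int :=
  ((((PySem.Dict.empty.insert '*' 10).insert '+' 10).insert '{' 15).insert '|' 5).insert '(' 5

-- the 'for i in range(len(pattern))' loop of Source B: walk the suffixes, danger-prefix test + weight accumulator
def pvScan (pattern : String) (max_complexity : Int) : List Char → Int → Option String
  | [], acc => if acc ≤ max_complexity then some pattern else none
  | c :: rest, acc =>
    if pvDangersL.any (fun d => d.isPrefixOf (c :: rest)) then none
    else pvScan pattern max_complexity rest (acc + pvWeights.getD c 0)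

def sanitize_regex_alt (pattern : String) (max_complexity : Int) : Option String :=
  pvScan pattern max_complexity pattern.toList 0

-- ===== PRECONDITION & SPEC =====
def Spec_sanitize_regex (pattern : String) (max_complexity : Int) (out : Option String) : Prop := out = sanitize_regex_alt pattern max_complexity
instance (pattern : String) (max_complexity : Int) (out : Option String) : Decidable (Spec_sanitize_regex pattern max_complexity out) := by unfold Spec_sanitize_regex; infer_instance

-- ===== CLAIM (what is proved, stated in full; the proofs are below) =====
def Claim_equal_sanitize_regex : Prop := ∀ (pattern : String) (max_complexity : Int), Dom_sanitize_regex pattern max_complexity → Spec_sanitize_regex pattern max_complexity (sanitize_regex pattern max_complexity)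

-- ===== LEMMAS AND PROOFS =====

-- weight of one character
def pvW (c : Char) : Int := pvWeights.getD c 0

-- the scan loop, characterised: danger occurring anywhere in cs ⇒ none, else threshold test on acc + weight sum
lemma pvScan_eq (p : String) (m : Int) (cs : List Char) (acc : Int) :
    pvScan p m cs acc =
      if pvDangersL.any (fun d => decide (d <:+: cs)) then none
      else if acc + (cs.map pvW).sum ≤ m then some p else none := by
  induction cs generalizing acc with
  | nil =>
    simp [pvScan]
    intro hd
    exact absurd hd (by decide)
  | cons c rest ih =>
    rw [pvScan]
    by_cases hp : pvDangersL.any (fun d => d.isPrefixOf (c :: rest)) = true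
    · rw [if_pos hp]
      have : pvDangersL.any (fun d => decide (d <:+: (c :: rest))) = true := by
        rw [List.any_eq_true] at hp ⊢
        obtain ⟨d, hd, hpre⟩ := hp
        exact ⟨d, hd, by simp [List.IsPrefix.isInfix (List.isPrefixOf_iff_prefix.mp hpre)]⟩
      rw [if_pos this]
    · rw [if_neg hp, ih]
      have hp' : ∀ d ∈ pvDangersL, ¬ d <+: (c :: rest) := by
        intro d hd hpre
        exact hp (List.any_eq_true.mpr ⟨d, hd, List.isPrefixOf_iff_prefix.mpr hpre⟩)
      have hinf : pvDangersL.any (fun d => decide (d <:+: (c :: rest)))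
          = pvDangersL.any (fun d => decide (d <:+: rest)) := by
        rw [Bool.eq_iff_iff, List.any_eq_true, List.any_eq_true]
        constructor
        · rintro ⟨d, hd, h⟩
          refine ⟨d, hd, ?_⟩
          simp only [decide_eq_true_eq] at h ⊢
          rcases List.infix_cons_iff.mp h with hpre | hi
          · exact absurd hpre (hp' d hd)
          · exact hi
        · rintro ⟨d, hd, h⟩
          refine ⟨d, hd, ?_⟩
          simp only [decide_eq_true_eq] at h ⊢
          exact h.trans (List.suffix_cons c rest).isInfix
      rw [hinf]
      simp only [List.map_cons, List.sum_cons, pvW]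
      ring_nf
  
-- Chars.count.go on a single-character needle just counts that character.
lemma pv_count_go_single (c : Char) : ∀ (l : List Char) (fuel acc : Nat), l.length ≤ fuel →
    PySem.Chars.count.go [c] fuel l acc = acc + l.count c := by
  intro l
  induction l with
  | nil =>
    intro fuel acc _
    cases fuel <;> simp [PySem.Chars.count.go]
  | cons h t ih =>
    intro fuel acc hf
    cases fuel with
    | succ f =>
      rw [PySem.Chars.count.go]
      by_cases hc : c = h
      · subst hc
        rw [if_pos (by simp)]
        simp only [List.length_cons, List.length_nil, List.drop_succ_cons, List.drop_zero]
        rw [ih f (acc + 1) (by simpa using hf)]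
        simp
        omega
      · rw [if_neg (by simp [List.isPrefixOf, hc])]
        rw [ih f acc (by simpa using hf)]
        simp [Ne.symm hc]
    | zero => simp at hf

-- Str.count on a single-character needle
lemma pv_count_single (cs : List Char) (c : Char) :
    PySem.Chars.count cs [c] = cs.count c := by
  simp [PySem.Chars.count, pv_count_go_single c cs cs.length 0 le_rfl]

-- B's weight sum equals A's five weighted counts
lemma pv_wsum (cs : List Char) :
    (cs.map pvW).sum
      = ((0 : Int) + (cs.count '*' : Int) * 10 + (cs.count '+' : Int) * 10
          + (cs.count '{' : Int) * 15 + (cs.count '|' : Int) * 5 + (cs.count '(' : Int) * 5) := by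
  induction cs with
  | nil => simp
  | cons h t ih =>
    simp only [List.map_cons, List.sum_cons, List.count_cons, ih]
    by_cases h1 : h = '*'
    · subst h1; have hw : pvW '*' = 10 := by decide
      simp only [hw]; simp; omega
    · by_cases h2 : h = '+'
      · subst h2; have hw : pvW '+' = 10 := by decide
        simp only [hw]; simp; omega
      · by_cases h3 : h = '{'
        · subst h3; have hw : pvW '{' = 15 := by decide
          simp only [hw]; simp; omega
        · by_cases h4 : h = '|'
          · subst h4; have hw : pvW '|' = 5 := by decide
            simp only [hw]; simp; omega
          · by_cases h5 : h = '('
            · subst h5; have hw : pvW '(' = 5 := by decide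
              simp only [hw]; simp; omega
            · have hw : pvW h = 0 := by
                simp [pvW, pvWeights, PySem.Dict.getD, PySem.Dict.get?, PySem.Dict.insert,
                  PySem.Dict.empty, Ne.symm h1, Ne.symm h2, Ne.symm h3, Ne.symm h4, Ne.symm h5]
              simp only [hw]
              simp [h1, h2, h3, h4, h5]

-- A's substring tests agree with B's any-suffix prefix tests
lemma pv_danger_eq (pattern : String) :
    pvDangerous.any (fun d => PySem.Str.isIn d pattern)
      = pvDangersL.any (fun d => decide (d <:+: pattern.toList)) := by
  simp only [pvDangersL, List.any_map]
  congr 1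
  funext d
  rw [Bool.eq_iff_iff]
  simp only [Function.comp_apply, decide_eq_true_eq]
  exact PySem.Str.isIn_iff_infix d pattern

-- ===== VERDICT (by name: the statement is the Claim_ definition above) =====
theorem sanitize_regex_spec : Claim_equal_sanitize_regex := by
  intro pattern max_complexity _
  unfold Spec_sanitize_regex sanitize_regex sanitize_regex_alt
  rw [pvScan_eq, ← pv_danger_eq]
  by_cases hd : pvDangerous.any (fun d => PySem.Str.isIn d pattern) = true
  · rw [if_pos hd, if_pos hd]
  · rw [if_neg hd, if_neg hd]
    rw [pv_wsum]
    show (if ((0 : Int)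
        + (PySem.Str.count pattern "*" : Int) * 10
        + (PySem.Str.count pattern "+" : Int) * 10
        + (PySem.Str.count pattern "{" : Int) * 15
        + (PySem.Str.count pattern "|" : Int) * 5
        + (PySem.Str.count pattern "(" : Int) * 5) > max_complexity then none else some pattern)
      = _
    have he : ((0 : Int)
        + (PySem.Str.count pattern "*" : Int) * 10
        + (PySem.Str.count pattern "+" : Int) * 10
        + (PySem.Str.count pattern "{" : Int) * 15
        + (PySem.Str.count pattern "|" : Int) * 5
        + (PySem.Str.count pattern "(" : Int) * 5)
      = ((0 : Int) + (pattern.toList.count '*' : Int) * 10 + (pattern.toList.count '+' : Int) * 10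
          + (pattern.toList.count '{' : Int) * 15 + (pattern.toList.count '|' : Int) * 5
          + (pattern.toList.count '(' : Int) * 5) := by
      simp [PySem.Str.count, pv_count_single]
    rw [he]
    set W := ((0 : Int) + (pattern.toList.count '*' : Int) * 10 + (pattern.toList.count '+' : Int) * 10
          + (pattern.toList.count '{' : Int) * 15 + (pattern.toList.count '|' : Int) * 5
          + (pattern.toList.count '(' : Int) * 5) with hW
    by_cases hle : 0 + W ≤ max_complexity
    · rw [if_pos hle, if_neg (by omega)]
    · rw [if_neg hle, if_pos (by omega)]
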